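-- pv_equiv track=rewrite | github.com/clambering-goat/hackthon | read_input.py | create_dic_for_input
-- ===== SOURCE A (Python) =====
-- def create_dic_for_input(data):
--     data_dict = {}
--
--     for index in range(1, len(data)):
--         row = data[index]
--         tables = {}
--         fields = set()
--
--         db_name = row[0]
--         table_name = row[2]
--         field_name = row[3]
--
--         if not db_name in data_dict:
--             data_dict[db_name] = {}
--
--         tables = data_dict[db_name]
--         if not table_name in tables:
--             tables[table_name] = set()
--
--         fields = tables[table_name]
--         fields.add(field_name)
--
--     return data_dict
-- ===== SOURCE B (Python) =====
-- def create_dic_for_input(data):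
--     rows = data[1:]
--     return {
--         db: {
--             tb: {r[3] for r in rows if r[0] == db and r[2] == tb}
--             for tb in dict.fromkeys(r[2] for r in rows if r[0] == db)
--         }
--         for db in dict.fromkeys(r[0] for r in rows)
--     }
-- ===== Notes on version B (the rewrite author's own statement) =====
-- stated objective: alternative
-- what changed: Replaces A's incremental guard-and-insert mutation of a nested dict with a declarative nested dict-comprehension that dedups db/table names (dict.fromkeys) and collects each field group by filtering the row list.
import Mathlib
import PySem

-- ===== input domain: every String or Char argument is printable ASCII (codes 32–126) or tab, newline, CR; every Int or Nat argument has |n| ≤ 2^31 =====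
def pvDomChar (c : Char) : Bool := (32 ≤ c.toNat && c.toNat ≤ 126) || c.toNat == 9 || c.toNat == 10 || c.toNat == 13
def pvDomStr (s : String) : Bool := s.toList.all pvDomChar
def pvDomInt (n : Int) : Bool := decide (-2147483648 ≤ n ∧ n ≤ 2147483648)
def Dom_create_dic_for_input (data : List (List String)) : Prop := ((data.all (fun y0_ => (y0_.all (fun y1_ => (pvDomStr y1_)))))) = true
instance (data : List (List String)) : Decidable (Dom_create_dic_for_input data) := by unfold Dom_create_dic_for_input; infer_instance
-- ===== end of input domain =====

-- B replaces A's incremental guard-and-insert single pass over a mutated nested dict with a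
-- declarative nested grouping (dedup the db/table names, filter the rows per group); objective: alternative.

-- ===== PORT A =====
-- A's loop body: conditional creation of the inner dict / set, then mutation via aliasing,
-- modelled by writing the updated inner structures back (insert overwrites in place).
def create_dic_for_input_step
    (data_dict : PySem.Dict String (PySem.Dict String (PySem.Set String)))
    (row : List String) : PySem.Dict String (PySem.Dict String (PySem.Set String)) :=
  let db_name := PySem.List.pyGetD row 0 ""
  let table_name := PySem.List.pyGetD row 2 ""
  let field_name := PySem.List.pyGetD row 3 ""
  let data_dict := if data_dict.contains db_name then data_dict
                   else data_dict.insert db_name PySem.Dict.empty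
  let tables := data_dict.getD db_name PySem.Dict.empty
  let tables := if tables.contains table_name then tables
                else tables.insert table_name PySem.Set.empty
  let fields := tables.getD table_name PySem.Set.empty
  let fields := PySem.Set.add fields field_name
  data_dict.insert db_name (tables.insert table_name fields)

def create_dic_for_input_loop (data : List (List String)) :
    PySem.Dict String (PySem.Dict String (PySem.Set String)) :=
  (PySem.List.pyRange 1 (PySem.List.len data) 1).foldl
    (fun data_dict index => create_dic_for_input_step data_dict (PySem.List.pyGetD data index []))
    PySem.Dict.empty

def create_dic_for_input (data : List (List String)) : List (String × List (String × List String)) :=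
  (create_dic_for_input_loop data).items.map (fun p => (p.1, p.2.items))

-- ===== PORT B =====
def create_dic_for_input_alt (data : List (List String)) : List (String × List (String × List String)) :=
  let rows := PySem.List.slice data (some 1) none
  (PySem.List.dedup (rows.map (fun r => PySem.List.pyGetD r 0 ""))).map (fun db =>
    (db,
      (PySem.List.dedup ((rows.filter (fun r => PySem.List.pyGetD r 0 "" == db)).map
          (fun r => PySem.List.pyGetD r 2 ""))).map (fun tb =>
        (tb,
          PySem.Set.ofList ((rows.filter (fun r =>
              PySem.List.pyGetD r 0 "" == db && PySem.List.pyGetD r 2 "" == tb)).map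
            (fun r => PySem.List.pyGetD r 3 ""))))))

-- ===== PRECONDITION & SPEC =====
-- Pre_ excludes exactly the inputs where Python A raises IndexError: a non-header row
-- with fewer than 4 entries (A reads row[0], row[2], row[3]).
def Pre_create_dic_for_input (data : List (List String)) : Prop :=
  ∀ row ∈ data.tail, 4 ≤ row.length
instance (data : List (List String)) : Decidable (Pre_create_dic_for_input data) := by
  unfold Pre_create_dic_for_input; infer_instance

def pvWitness_create_dic_for_input : List (List String) :=
  [["db", "x", "table", "field"], ["d1", "", "t1", "f1"], ["d1", "", "t1", "f2"]]

def Spec_create_dic_for_input (data : List (List String)) (out : List (String × List (String × List String))) : Prop := out = create_dic_for_input_alt data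
instance (data : List (List String)) (out : List (String × List (String × List String))) : Decidable (Spec_create_dic_for_input data out) := by unfold Spec_create_dic_for_input; infer_instance

-- ===== CLAIM (what is proved, stated in full; the proofs are below) =====
def Claim_equal_create_dic_for_input : Prop := ∀ (data : List (List String)), Dom_create_dic_for_input data → Pre_create_dic_for_input data → Spec_create_dic_for_input data (create_dic_for_input data)

-- ===== LEMMAS AND PROOFS =====
-- row projections used only by the proofs
def pvDb (r : List String) : String := PySem.List.pyGetD r 0 ""
def pvTb (r : List String) : String := PySem.List.pyGetD r 2 ""
def pvFd (r : List String) : String := PySem.List.pyGetD r 3 ""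

-- A's loop body collapses to a nested Dict.modify.
theorem pv_step_eq (d : PySem.Dict String (PySem.Dict String (PySem.Set String))) (row : List String) :
    create_dic_for_input_step d row =
      d.modify (pvDb row) PySem.Dict.empty
        (fun t => t.modify (pvTb row) PySem.Set.empty (fun s => PySem.Set.add s (pvFd row))) := by
  unfold create_dic_for_input_step pvDb pvTb pvFd
  simp only [PySem.Dict.modify]
  by_cases h1 : d.contains (PySem.List.pyGetD row 0 "")
  · simp only [h1, if_true]
    by_cases h2 : (d.getD (PySem.List.pyGetD row 0 "") PySem.Dict.empty).contains (PySem.List.pyGetD row 2 "")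
    · simp [h2]
    · simp [h2, PySem.Dict.insert_insert_self, PySem.Dict.getD_insert_self,
        PySem.Dict.getD_of_not_contains _ _ (by simpa using h2)]
  · have h1' : d.contains (PySem.List.pyGetD row 0 "") = false := by simpa using h1
    simp only [h1', Bool.false_eq_true, if_false]
    rw [PySem.Dict.getD_insert_self]
    rw [PySem.Dict.getD_of_not_contains d PySem.Dict.empty h1']
    simp [PySem.Dict.insert_insert_self, PySem.Dict.getD_insert_self,
      PySem.Dict.contains_empty, PySem.Dict.getD_empty]

theorem pv_getD_foldl_modify {ν : Type} (key : List String → String) (d0 : ν)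
    (f : List String → ν → ν) (l : List (List String)) (d : PySem.Dict String ν) (k : String) :
    (l.foldl (fun d r => d.modify (key r) d0 (f r)) d).getD k d0 =
      (l.filter (fun r => key r == k)).foldl (fun v r => f r v) (d.getD k d0) := by
  induction l generalizing d with
  | nil => rfl
  | cons r t ih =>
    simp only [List.foldl_cons, List.filter_cons]
    by_cases h : key r = k
    · subst h
      simp [ih, PySem.Dict.getD_modify_self]
    · rw [ih]
      have : (key r == k) = false := by simpa using h
      rw [this]
      simp only [Bool.false_eq_true, if_false]
      rw [PySem.Dict.getD_modify_of_ne _ d0 _ (Ne.symm h)]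

-- a fold of Set.add over a projection is set(map …)
theorem pv_foldl_add_eq_ofList (l : List (List String)) :
    l.foldl (fun s r => PySem.Set.add s (pvFd r)) PySem.Set.empty =
      PySem.Set.ofList (l.map pvFd) := by
  rw [PySem.Set.ofList_eq_foldl, List.foldl_map]
  rfl

theorem pv_keys_foldl (l : List (List String)) {ν : Type} (key : List String → String) (d0 : ν)
    (f : List String → ν → ν) :
    (l.foldl (fun d r => d.modify (key r) d0 (f r)) PySem.Dict.empty).keys =
      PySem.List.dedup (l.map key) := by
  rw [PySem.Dict.keys_foldl_modify_key l key d0 (fun _ r => f r) PySem.Dict.empty]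
  rw [PySem.List.dedup_eq_ofList, PySem.Set.ofList_eq_foldl]
  rfl

theorem pv_nodup_keys_foldl (l : List (List String)) {ν : Type} (key : List String → String) (d0 : ν)
    (f : List String → ν → ν) :
    (l.foldl (fun d r => d.modify (key r) d0 (f r)) PySem.Dict.empty).keys.Nodup := by
  apply PySem.Dict.nodup_keys_foldl_modify_key l key d0 (fun _ r => f r) PySem.Dict.empty
  simp

-- ===== VERDICT =====
theorem create_dic_for_input_spec : Claim_equal_create_dic_for_input := by
  intro data _ _
  unfold Spec_create_dic_for_input create_dic_for_input create_dic_for_input_alt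
  have hloop : create_dic_for_input_loop data =
      data.tail.foldl (fun d r => d.modify (pvDb r) PySem.Dict.empty
        (fun t => t.modify (pvTb r) PySem.Set.empty (fun s => PySem.Set.add s (pvFd r))))
        PySem.Dict.empty := by
    unfold create_dic_for_input_loop
    rw [PySem.List.foldl_pyRange_pyGetD data []
        (fun d r => create_dic_for_input_step d r) PySem.Dict.empty (by norm_num : (0:Int) ≤ 1)]
    simp only [Int.toNat_one, List.drop_one]
    apply PySem.List.foldl_congr_mem
    intro d r _
    exact pv_step_eq d r
  rw [PySem.List.slice_from data (by norm_num : (0:Int) ≤ 1)]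
  simp only [Int.toNat_one, List.drop_one]
  rw [hloop]
  have e0 : ∀ r : List String, PySem.List.pyGetD r 0 "" = pvDb r := fun _ => rfl
  have e2 : ∀ r : List String, PySem.List.pyGetD r 2 "" = pvTb r := fun _ => rfl
  have e3 : ∀ r : List String, PySem.List.pyGetD r 3 "" = pvFd r := fun _ => rfl
  simp only [e0, e2, e3]
  rw [PySem.Dict.items_eq_map_keys _ (pv_nodup_keys_foldl data.tail pvDb _ _) PySem.Dict.empty,
      pv_keys_foldl data.tail pvDb PySem.Dict.empty _, List.map_map]
  apply List.map_congr_left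
  intro db hdb
  simp only [Function.comp_apply]
  congr 1
  rw [pv_getD_foldl_modify pvDb PySem.Dict.empty _ data.tail PySem.Dict.empty db]
  rw [show (PySem.Dict.empty : PySem.Dict String (PySem.Dict String (PySem.Set String))).getD db PySem.Dict.empty = PySem.Dict.empty from rfl]
  rw [PySem.Dict.items_eq_map_keys _ (pv_nodup_keys_foldl _ pvTb _ _) PySem.Set.empty,
      pv_keys_foldl _ pvTb PySem.Set.empty _]
  apply List.map_congr_left
  intro tb htb
  congr 1
  rw [pv_getD_foldl_modify pvTb PySem.Set.empty _ _ PySem.Dict.empty tb]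
  rw [show (PySem.Dict.empty : PySem.Dict String (PySem.Set String)).getD tb PySem.Set.empty = PySem.Set.empty from rfl]
  rw [List.filter_filter, pv_foldl_add_eq_ofList]
  congr 1
  apply congrArg
  apply List.filter_congr
  intro r _
  exact Bool.and_comm _ _
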